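-- pv_equiv track=rewrite | github.com/moss-lab/Maize_Project_Scripts | ScanFold-Scan_Temperatures.py | computeCountAndLists
-- ===== SOURCE A (Python) =====
-- def computeCountAndLists(s):
--   #WARNING: Use of function count(s,'UU') returns 1 on word UUU
--   #since it apparently counts only nonoverlapping words UU
--   #For this reason, we work with the indices.
--
--   #Initialize lists and mono- and dinucleotide dictionaries
--   List = {} #List is a dictionary of lists
--   List['A'] = []; List['C'] = [];
--   List['G'] = []; List['U'] = [];
--   nuclList   = ["A","C","G","U"]
--   s       = s.upper()
--   s       = s.replace("T","U")
--   nuclCnt    = {}  #empty dictionary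
--   dinuclCnt  = {}  #empty dictionary
--   for x in nuclList:
--     nuclCnt[x]=0
--     dinuclCnt[x]={}
--     for y in nuclList:
--       dinuclCnt[x][y]=0
--
--   #Compute count and lists
--   nuclCnt[s[0]] = 1
--   nuclTotal     = 1
--   dinuclTotal   = 0
--   for i in range(len(s)-1):
--     x = s[i]; y = s[i+1]
--     List[x].append( y )
--     nuclCnt[y] += 1; nuclTotal  += 1
--     dinuclCnt[x][y] += 1; dinuclTotal += 1
--   assert (nuclTotal==len(s))
--   assert (dinuclTotal==len(s)-1)
--   return nuclCnt,dinuclCnt,List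
-- ===== SOURCE B (Python) =====
-- def _overlapCount(s, sub):
--     # overlapping occurrences of sub in s via repeated str.find
--     n = 0
--     i = s.find(sub)
--     while i != -1:
--         n += 1
--         i = s.find(sub, i + 1)
--     return n
--
-- def computeCountAndLists(s):
--     s = s.upper().replace("T", "U")
--     keys = "ACGU"
--     nuclCnt = {x: sum(c == x for c in s) for x in keys}
--     dinuclCnt = {x: {y: _overlapCount(s, x + y) for y in keys} for x in keys}
--     List = {x: [y for c, y in zip(s, s[1:]) if c == x] for x in keys}
--     return nuclCnt, dinuclCnt, List
-- ===== Notes on version B (the rewrite author's own statement) =====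
-- stated objective: alternative
-- what changed: B replaces A's single index loop that accumulates all three dicts at once by staged per-symbol passes: mononucleotide counts as per-letter boolean sums, each of the 16 dinucleotide counts by an overlapping substring search with repeated str.find, and the successor lists as per-letter filtered zip comprehensions.
-- intended difference: On one-character strings whose letter is not A/C/G/T/U (any case), A returns a nuclCnt dict with a spurious fifth key for that letter (an artefact of the dict assignment nuclCnt[s[0]]=1), while B returns the clean zero counts over the intended ACGU alphabet only. — e.g. on computeCountAndLists("X"): A returns ([("A",0),("C",0),("G",0),("U",0),("X",1)], [("A",[("A",0),("C",0),("G",0),("U",0)]),("C",[("A",0),("C",0),("G",0),("U"…, B returns ([("A",0),("C",0),("G",0),("U",0)], [("A",[("A",0),("C",0),("G",0),("U",0)]),("C",[("A",0),("C",0),("G",0),("U",0)]), (…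
import Mathlib
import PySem

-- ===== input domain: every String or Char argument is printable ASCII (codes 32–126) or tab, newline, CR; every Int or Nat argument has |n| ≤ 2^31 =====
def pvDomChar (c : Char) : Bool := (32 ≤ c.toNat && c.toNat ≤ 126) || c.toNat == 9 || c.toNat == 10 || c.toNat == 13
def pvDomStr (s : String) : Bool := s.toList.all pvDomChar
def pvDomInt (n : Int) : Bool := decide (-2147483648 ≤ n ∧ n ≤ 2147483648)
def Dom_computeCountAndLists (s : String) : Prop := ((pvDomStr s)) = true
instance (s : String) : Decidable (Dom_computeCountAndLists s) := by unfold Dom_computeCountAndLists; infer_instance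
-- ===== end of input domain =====

set_option maxRecDepth 8000

-- B replaces A's single accumulating index loop by staged per-symbol passes (boolean sums for the
-- mononucleotide counts, overlapping str.find substring search for each dinucleotide, filtered
-- zip comprehensions for the successor lists); objective: alternative, same O(n) cost.

-- Python's one-character strings s[i] become Lean Strings via this helper (used by both ports).
def pvChStr (c : Char) : String := String.ofList [c]

-- ===== PORT A =====
-- The always-true assert counters nuclTotal/dinuclTotal of A are not part of the result and are omitted.
def computeCountAndLists (s : String) : (List (String × Int)) × (List (String × List (String × Int))) × (List (String × List String)) :=
  let L0 : PySem.Dict String (List String) :=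
    ((((PySem.Dict.empty).insert "A" ([] : List String)).insert "C" []).insert "G" []).insert "U" []
  let nuclList : List String := ["A", "C", "G", "U"]
  let cs : List Char := PySem.Chars.replace (PySem.Chars.upper s.toList) ['T'] ['U']
  let init : PySem.Dict String Int × PySem.Dict String (PySem.Dict String Int) :=
    nuclList.foldl (fun p x =>
      (p.1.insert x 0,
       nuclList.foldl (fun d y => d.modify x PySem.Dict.empty (fun m => m.insert y 0))
         (p.2.insert x PySem.Dict.empty)))
      (PySem.Dict.empty, PySem.Dict.empty)
  let nucl0 := init.1.insert (pvChStr (PySem.List.pyGetD cs 0 'A')) 1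
  let st := (PySem.List.pyRange 0 ((cs.length : Int) - 1) 1).foldl
    (fun (st : PySem.Dict String (List String) × PySem.Dict String Int × PySem.Dict String (PySem.Dict String Int)) i =>
      (st.1.modify (pvChStr (PySem.List.pyGetD cs i 'A')) [] (· ++ [pvChStr (PySem.List.pyGetD cs (i+1) 'A')]),
       st.2.1.modify (pvChStr (PySem.List.pyGetD cs (i+1) 'A')) 0 (· + 1),
       st.2.2.modify (pvChStr (PySem.List.pyGetD cs i 'A')) PySem.Dict.empty
         (fun m => m.modify (pvChStr (PySem.List.pyGetD cs (i+1) 'A')) 0 (· + 1))))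
    (L0, nucl0, init.2)
  (st.2.1.items, st.2.2.items.map (fun q => (q.1, q.2.items)), st.1.items)

-- ===== PORT B =====
-- _overlapCount's while loop over str.find, with fuel |s|+1 (the found index strictly increases
-- each turn and stays below |s|, so the fuel is never exhausted).
def ovGo (s sub : List Char) : Nat → Int → Int → Int
  | 0, n, _ => n
  | fuel+1, n, i => if i = -1 then n else ovGo s sub fuel (n+1) (PySem.Chars.findFrom s sub (i+1) none)

def overlapCount (s sub : List Char) : Int :=
  ovGo s sub (s.length + 1) 0 (PySem.Chars.find s sub)

def computeCountAndLists_alt (s : String) : (List (String × Int)) × (List (String × List (String × Int))) × (List (String × List String)) :=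
  let cs : List Char := PySem.Chars.replace (PySem.Chars.upper s.toList) ['T'] ['U']
  let keys : List Char := ['A', 'C', 'G', 'U']
  (keys.map (fun x => (pvChStr x, (cs.map (fun c => if c == x then (1 : Int) else 0)).sum)),
   keys.map (fun x => (pvChStr x, keys.map (fun y => (pvChStr y, overlapCount cs [x, y])))),
   keys.map (fun x => (pvChStr x,
     ((cs.zip (PySem.List.slice cs (some 1) none)).filter (fun p => p.1 == x)).map (fun p => pvChStr p.2))))

-- ===== PRECONDITION & SPEC =====
-- Pre_ admits exactly the inputs on which the Python A returns: a nonempty string that is either of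
-- length 1 (the loop never runs) or made of A/C/G/T/U letters (any case); on other inputs A raises
-- IndexError or KeyError.
def Pre_computeCountAndLists (s : String) : Prop :=
  s.toList ≠ [] ∧ (s.toList.length = 1 ∨
    ∀ c ∈ s.toList, c ∈ (['A','C','G','T','U','a','c','g','t','u'] : List Char))
instance (s : String) : Decidable (Pre_computeCountAndLists s) := by
  unfold Pre_computeCountAndLists; infer_instance

def pvWitness_computeCountAndLists : String := "A"

-- On one-character strings whose letter is not A/C/G/T/U (any case), A returns a nuclCnt dict with a
-- spurious fifth key for that letter (an artefact of the dict assignment nuclCnt[s[0]] = 1), while B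
-- returns the clean zero counts over the intended ACGU alphabet only.
def D_computeCountAndLists (s : String) : Prop :=
  s.length = 1 ∧ ∀ c ∈ s.toList, c ∉ "ACGTUacgtu".toList
instance (s : String) : Decidable (D_computeCountAndLists s) := by
  unfold D_computeCountAndLists; infer_instance

def Spec_computeCountAndLists (s : String) (out : (List (String × Int)) × (List (String × List (String × Int))) × (List (String × List String))) : Prop := ¬ D_computeCountAndLists s → out = computeCountAndLists_alt s
instance (s : String) (out : (List (String × Int)) × (List (String × List (String × Int))) × (List (String × List String))) : Decidable (Spec_computeCountAndLists s out) := by unfold Spec_computeCountAndLists; infer_instance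

def pvDiffWitness_computeCountAndLists : String := "X"

def pvDiffWitnessOut_computeCountAndLists : ((List (String × Int)) × (List (String × List (String × Int))) × (List (String × List String))) × ((List (String × Int)) × (List (String × List (String × Int))) × (List (String × List String))) :=
  (([("A",0),("C",0),("G",0),("U",0),("X",1)],
    [("A",[("A",0),("C",0),("G",0),("U",0)]),("C",[("A",0),("C",0),("G",0),("U",0)]),
     ("G",[("A",0),("C",0),("G",0),("U",0)]),("U",[("A",0),("C",0),("G",0),("U",0)])],
    [("A",[]),("C",[]),("G",[]),("U",[])]),
   ([("A",0),("C",0),("G",0),("U",0)],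
    [("A",[("A",0),("C",0),("G",0),("U",0)]),("C",[("A",0),("C",0),("G",0),("U",0)]),
     ("G",[("A",0),("C",0),("G",0),("U",0)]),("U",[("A",0),("C",0),("G",0),("U",0)])],
    [("A",[]),("C",[]),("G",[]),("U",[])]))

-- ===== CLAIM (what is proved, stated in full; the proofs are below) =====
def Claim_unchanged_computeCountAndLists : Prop := ∀ (s : String), Dom_computeCountAndLists s → Pre_computeCountAndLists s → Spec_computeCountAndLists s (computeCountAndLists s)

def Claim_exact_computeCountAndLists : Prop := ∀ (s : String), Dom_computeCountAndLists s → Pre_computeCountAndLists s → D_computeCountAndLists s → computeCountAndLists s ≠ computeCountAndLists_alt s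

def Claim_changed_computeCountAndLists : Prop := Dom_computeCountAndLists (pvDiffWitness_computeCountAndLists) ∧ Pre_computeCountAndLists (pvDiffWitness_computeCountAndLists) ∧ D_computeCountAndLists (pvDiffWitness_computeCountAndLists) ∧ computeCountAndLists (pvDiffWitness_computeCountAndLists) = pvDiffWitnessOut_computeCountAndLists.1 ∧ computeCountAndLists_alt (pvDiffWitness_computeCountAndLists) = pvDiffWitnessOut_computeCountAndLists.2 ∧ pvDiffWitnessOut_computeCountAndLists.1 ≠ pvDiffWitnessOut_computeCountAndLists.2

-- ===== LEMMAS AND PROOFS =====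

lemma pvChStr_eq_iff (a b : Char) : pvChStr a = pvChStr b ↔ a = b := by
  constructor
  · intro h
    have := congrArg String.toList h
    simpa [pvChStr] using this
  · rintro rfl; rfl

lemma pvChStr_beq (a b : Char) : (pvChStr a == pvChStr b) = (a == b) := by
  by_cases h : a = b
  · simp [h]
  · simp [pvChStr_eq_iff, h]

lemma pvChStr_inj : Function.Injective pvChStr := fun a b h => (pvChStr_eq_iff a b).mp h

lemma pv_go_single (fuel : Nat) : ∀ (l acc : List Char), l.length ≤ fuel →
    PySem.Chars.replace.go ['T'] ['U'] fuel l acc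
      = acc.reverse ++ l.map (fun c => if c = 'T' then 'U' else c) := by
  induction fuel with
  | zero =>
    intro l acc h
    rw [PySem.Chars.replace.go]
    simp at h; subst h; simp
  | succ n ih =>
    intro l acc h
    cases l with
    | nil => rw [PySem.Chars.replace.go]; simp; omega
    | cons c t =>
      rw [PySem.Chars.replace.go]
      by_cases hc : c = 'T'
      · subst hc
        have hp : List.isPrefixOf ['T'] ('T' :: t) = true := by simp [List.isPrefixOf]
        simp only [hp, if_pos, List.length_cons, List.length_nil, List.drop_succ_cons,
          List.drop_zero, List.reverse_singleton, List.singleton_append]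
        rw [ih t ('U' :: acc) (by simpa using Nat.le_of_succ_le_succ h)]
        simp
      · have hp : List.isPrefixOf ['T'] (c :: t) = false := by
          simp [List.isPrefixOf]; exact fun h => hc h.symm
        rw [if_neg (by simp [hp])]
        rw [ih t (c :: acc) (by simpa using Nat.le_of_succ_le_succ h)]
        simp [hc]

lemma pv_replace_single (l : List Char) :
    PySem.Chars.replace l ['T'] ['U'] = l.map (fun c => if c = 'T' then 'U' else c) := by
  rw [PySem.Chars.replace]
  simp [pv_go_single l.length l [] le_rfl]

lemma pv_norm_valid (l : List Char)
    (h : ∀ c ∈ l, c ∈ (['A','C','G','T','U','a','c','g','t','u'] : List Char)) :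
    ∀ c ∈ PySem.Chars.replace (PySem.Chars.upper l) ['T'] ['U'],
      c ∈ (['A','C','G','U'] : List Char) := by
  rw [pv_replace_single]
  intro c hc
  simp only [PySem.Chars.upper, List.map_map, List.mem_map, Function.comp] at hc
  obtain ⟨a, ha, rfl⟩ := hc
  have := h a ha
  fin_cases this <;> decide

lemma pv_norm_length (l : List Char) :
    (PySem.Chars.replace (PySem.Chars.upper l) ['T'] ['U']).length = l.length := by
  rw [pv_replace_single]; simp [PySem.Chars.upper]

lemma pv_foldl_range_pairs {σ : Type} (cs : List Char) (f : σ → Char → Char → σ) (init : σ) :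
    (PySem.List.pyRange 0 ((cs.length : Int) - 1) 1).foldl
      (fun st i => f st (PySem.List.pyGetD cs i 'A') (PySem.List.pyGetD cs (i+1) 'A')) init
      = (cs.zip (cs.drop 1)).foldl (fun st p => f st p.1 p.2) init := by
  rcases cs with _ | ⟨c, t⟩
  · simp [PySem.List.pyRange_one_eq_nil]
  · set cs := c :: t with hcs
    have hlen : (cs.zip (cs.drop 1)).length = cs.length - 1 := by
      simp [List.length_zip]
    have hb : ((cs.length : Int) - 1) = PySem.List.len (cs.zip (cs.drop 1)) := by
      simp [PySem.List.len_eq, hcs]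
    rw [hb, ← PySem.List.foldl_pyRange_zero_pyGetD (cs.zip (cs.drop 1)) ('A','A')
      (fun st p => f st p.1 p.2) init]
    apply PySem.List.foldl_congr_mem
    intro acc i hi
    rw [PySem.List.mem_pyRange_one] at hi
    have h0 : 0 ≤ i := hi.1
    have h1 : i < ((cs.zip (cs.drop 1)).length : Int) := by
      have := hi.2; rw [PySem.List.len_eq] at this; exact this
    have hi1 : i.toNat < (cs.zip (cs.drop 1)).length := by omega
    have hic : i.toNat < cs.length := by omega
    have hic1 : i.toNat + 1 < cs.length := by omega
    rw [PySem.List.pyGetD_eq_getElem cs 'A' h0 (by omega),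
        PySem.List.pyGetD_eq_getElem cs 'A' (by omega : (0:Int) ≤ i + 1) (by omega),
        PySem.List.pyGetD_eq_getElem _ ('A','A') h0 h1]
    simp only [List.getElem_zip, List.getElem_drop]
    have e1 : (i + 1).toNat = i.toNat + 1 := by omega
    have e2 : 1 + i.toNat = i.toNat + 1 := by omega
    congr 1; simp [e1, e2]

lemma pv_foldl_prod3 {α σ₁ σ₂ σ₃ : Type} (f1 : σ₁ → α → σ₁) (f2 : σ₂ → α → σ₂) (f3 : σ₃ → α → σ₃)
    (l : List α) (a : σ₁) (b : σ₂) (c : σ₃) :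
    l.foldl (fun st e => (f1 st.1 e, f2 st.2.1 e, f3 st.2.2 e)) (a, b, c)
      = (l.foldl f1 a, l.foldl f2 b, l.foldl f3 c) := by
  induction l generalizing a b c with
  | nil => rfl
  | cons x t ih => simp [List.foldl, ih]

lemma pv_A_fold (cs : List Char) (L : PySem.Dict String (List String)) (N : PySem.Dict String Int)
    (D : PySem.Dict String (PySem.Dict String Int)) :
    (PySem.List.pyRange 0 ((cs.length : Int) - 1) 1).foldl
      (fun (st : PySem.Dict String (List String) × PySem.Dict String Int × PySem.Dict String (PySem.Dict String Int)) i =>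
        (st.1.modify (pvChStr (PySem.List.pyGetD cs i 'A')) [] (· ++ [pvChStr (PySem.List.pyGetD cs (i+1) 'A')]),
         st.2.1.modify (pvChStr (PySem.List.pyGetD cs (i+1) 'A')) 0 (· + 1),
         st.2.2.modify (pvChStr (PySem.List.pyGetD cs i 'A')) PySem.Dict.empty
           (fun m => m.modify (pvChStr (PySem.List.pyGetD cs (i+1) 'A')) 0 (· + 1))))
      (L, N, D)
    = ((cs.zip (cs.drop 1)).foldl (fun d p => d.modify (pvChStr p.1) [] (· ++ [pvChStr p.2])) L,
       (cs.zip (cs.drop 1)).foldl (fun n p => n.modify (pvChStr p.2) 0 (· + 1)) N,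
       (cs.zip (cs.drop 1)).foldl (fun d p => d.modify (pvChStr p.1) PySem.Dict.empty
         (fun m => m.modify (pvChStr p.2) 0 (· + 1))) D) := by
  refine (pv_foldl_range_pairs cs (fun st cx cy =>
    (st.1.modify (pvChStr cx) [] (· ++ [pvChStr cy]),
     st.2.1.modify (pvChStr cy) 0 (· + 1),
     st.2.2.modify (pvChStr cx) PySem.Dict.empty
       (fun m => m.modify (pvChStr cy) 0 (· + 1)))) (L, N, D)).trans ?_
  exact pv_foldl_prod3
    (fun (d : PySem.Dict String (List String)) (p : Char × Char) =>
      d.modify (pvChStr p.1) [] (· ++ [pvChStr p.2]))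
    (fun (n : PySem.Dict String Int) (p : Char × Char) => n.modify (pvChStr p.2) 0 (· + 1))
    (fun (d : PySem.Dict String (PySem.Dict String Int)) (p : Char × Char) =>
      d.modify (pvChStr p.1) PySem.Dict.empty
        (fun m => m.modify (pvChStr p.2) 0 (· + 1))) _ L N D

-- keys are preserved by a fold of modify's whose keys are already present
lemma pv_keys_foldl {α ν : Type} (g : α → String) (d0 : ν) (f : α → ν → ν) (l : List α) :
    ∀ (D : PySem.Dict String ν), (∀ p ∈ l, g p ∈ D.keys) →
      (l.foldl (fun d p => d.modify (g p) d0 (f p)) D).keys = D.keys := by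
  induction l with
  | nil => intro D _; rfl
  | cons p t ih =>
    intro D h
    have hk : (D.modify (g p) d0 (f p)).keys = D.keys := by
      rw [PySem.Dict.keys_modify, PySem.Dict.keys_insert_of_contains]
      rw [PySem.Dict.contains_iff_mem_keys]
      exact h p (List.mem_cons_self ..)
    simp only [List.foldl_cons]
    rw [ih _ (by rw [hk]; exact fun q hq => h q (List.mem_cons_of_mem _ hq)), hk]

lemma pv_chstr_mem (c : Char) (h : c ∈ (['A','C','G','U'] : List Char)) :
    pvChStr c ∈ (["A","C","G","U"] : List String) := by
  fin_cases h <;> decide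

lemma pv_keys_inv (ps : List (Char × Char))
    (hps : ∀ p ∈ ps, p.1 ∈ (['A','C','G','U'] : List Char) ∧ p.2 ∈ (['A','C','G','U'] : List Char)) :
    ∀ (D : PySem.Dict String (PySem.Dict String Int)),
    D.keys = ["A","C","G","U"] →
    (∀ a ∈ (["A","C","G","U"] : List String), (D.getD a PySem.Dict.empty).keys = ["A","C","G","U"]) →
    (ps.foldl (fun d p => d.modify (pvChStr p.1) PySem.Dict.empty
        (fun m => m.modify (pvChStr p.2) 0 (· + 1))) D).keys = ["A","C","G","U"]
    ∧ ∀ a ∈ (["A","C","G","U"] : List String),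
        ((ps.foldl (fun d p => d.modify (pvChStr p.1) PySem.Dict.empty
          (fun m => m.modify (pvChStr p.2) 0 (· + 1))) D).getD a PySem.Dict.empty).keys = ["A","C","G","U"] := by
  induction ps with
  | nil => intro D hk hn; exact ⟨hk, hn⟩
  | cons p t ih =>
    intro D hk hn
    have hp := hps p (List.mem_cons_self ..)
    have hx : pvChStr p.1 ∈ (["A","C","G","U"] : List String) := pv_chstr_mem _ hp.1
    have hy : pvChStr p.2 ∈ (["A","C","G","U"] : List String) := pv_chstr_mem _ hp.2
    simp only [List.foldl_cons]
    apply ih (fun q hq => hps q (List.mem_cons_of_mem _ hq))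
    · rw [PySem.Dict.keys_modify, PySem.Dict.keys_insert_of_contains]
      · exact hk
      · rw [PySem.Dict.contains_iff_mem_keys, hk]; exact hx
    · intro a ha
      rw [PySem.Dict.getD_modify]
      by_cases hax : a = pvChStr p.1
      · rw [if_pos hax, PySem.Dict.keys_modify, PySem.Dict.keys_insert_of_contains]
        · exact hn (pvChStr p.1) hx
        · rw [PySem.Dict.contains_iff_mem_keys, hn (pvChStr p.1) hx]; exact hy
      · rw [if_neg hax]; exact hn a ha

-- mononucleotide fold: getD after the successor-increment fold
lemma pv_cnt1 (ps : List (Char × Char)) (N : PySem.Dict String Int) (a : String) :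
    (ps.foldl (fun n p => n.modify (pvChStr p.2) 0 (· + 1)) N).getD a 0
      = N.getD a 0 + ((ps.map (fun p => pvChStr p.2)).count a : Int) := by
  rw [← List.foldl_map (f := fun p : Char × Char => pvChStr p.2)
    (g := fun (d : PySem.Dict String Int) x => d.modify x 0 (· + 1))]
  exact PySem.Dict.getD_foldl_modify_add_one _ N a

-- dinucleotide fold: getD getD after the pair-increment fold
lemma pv_cnt2 (ps : List (Char × Char)) :
    ∀ (D : PySem.Dict String (PySem.Dict String Int)) (a b : String),
      (((ps.foldl (fun d p => d.modify (pvChStr p.1) PySem.Dict.empty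
          (fun m => m.modify (pvChStr p.2) 0 (· + 1))) D).getD a PySem.Dict.empty).getD b 0)
        = (D.getD a PySem.Dict.empty).getD b 0
          + (ps.countP (fun p => pvChStr p.1 == a && pvChStr p.2 == b) : Int) := by
  induction ps with
  | nil => intro D a b; simp
  | cons p t ih =>
    intro D a b
    simp only [List.foldl_cons]
    rw [ih, PySem.Dict.getD_modify, List.countP_cons]
    by_cases h1 : a = pvChStr p.1
    · rw [if_pos h1, PySem.Dict.getD_modify]
      by_cases h2 : b = pvChStr p.2
      · rw [if_pos h2]
        simp [h1, h2]
        omega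
      · rw [if_neg h2]
        have : ¬(pvChStr p.2 = b) := fun hc => h2 hc.symm
        simp [h1, this]
    · rw [if_neg h1]
      have : ¬(pvChStr p.1 = a) := fun hc => h1 hc.symm
      simp [this]

-- successor-list fold: getD after the append fold
lemma pv_app (ps : List (Char × Char)) :
    ∀ (D : PySem.Dict String (List String)) (a : String),
      (ps.foldl (fun d p => d.modify (pvChStr p.1) [] (· ++ [pvChStr p.2])) D).getD a []
        = D.getD a [] ++ (ps.filter (fun p => pvChStr p.1 == a)).map (fun p => pvChStr p.2) := by
  induction ps with
  | nil => intro D a; simp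
  | cons p t ih =>
    intro D a
    simp only [List.foldl_cons]
    rw [ih, PySem.Dict.getD_modify, List.filter_cons]
    by_cases h1 : pvChStr p.1 = a
    · rw [if_pos h1.symm]
      simp [h1]
    · rw [if_neg (fun hc => h1 hc.symm)]
      simp [h1]

-- the find-loop counts exactly the positions ≥ k at which sub occurs
lemma pv_infix_of_prefix_drop {sub s : List Char} {k j : Nat} (hkj : k ≤ j)
    (h : sub <+: s.drop j) : sub <:+: s.drop k := by
  have hdrop : s.drop j = (s.drop k).drop (j - k) := by
    rw [List.drop_drop]; congr 1; omega
  rw [hdrop] at h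
  exact h.isInfix.trans (List.drop_suffix _ _).isInfix

lemma pv_ov_loop (s sub : List Char) (hsub : sub ≠ []) (fuel : Nat) :
    ∀ (k : Nat) (n : Int), k ≤ s.length → s.length + 1 - k ≤ fuel →
      ovGo s sub fuel n (PySem.Chars.findFrom s sub (k : Int) none)
        = n + (((List.range' k (s.length - k)).countP (fun j => sub.isPrefixOf (s.drop j))) : Int) := by
  induction fuel with
  | zero => intro k n hk hf; omega
  | succ fuel ih =>
    intro k n hk hf
    by_cases h : PySem.Chars.findFrom s sub (k : Int) none = -1
    · have hni : ¬ sub <:+: s.drop k := (PySem.Chars.findFrom_natCast_eq_neg_one_iff s sub k hk).mp h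
      have hcnt : (List.range' k (s.length - k)).countP (fun j => sub.isPrefixOf (s.drop j)) = 0 := by
        rw [List.countP_eq_zero]
        intro j hj
        rw [List.mem_range'_1] at hj
        intro hp
        exact hni (pv_infix_of_prefix_drop hj.1 ((List.isPrefixOf_iff_prefix).mp hp))
      rw [h, hcnt]
      simp [ovGo]
    · obtain ⟨hkle, hpref, hmin⟩ := PySem.Chars.findFrom_natCast_spec s sub k hk h
      set r := PySem.Chars.findFrom s sub (k : Int) none with hr
      have hr0 : 0 ≤ r := le_trans (by exact_mod_cast Int.natCast_nonneg k) hkle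
      have hkidx : k ≤ r.toNat := by omega
      have hidxlt : r.toNat < s.length := by
        by_contra hge
        have : s.drop r.toNat = [] := List.drop_eq_nil_of_le (by omega)
        rw [this, List.prefix_nil] at hpref
        exact hsub hpref
      have hstep : ovGo s sub (fuel+1) n r
          = ovGo s sub fuel (n+1) (PySem.Chars.findFrom s sub (r+1) none) := by
        simp only [ovGo]
        rw [if_neg (by omega)]
      have hcast : r + 1 = ((r.toNat + 1 : Nat) : Int) := by omega
      rw [hstep, hcast, ih (r.toNat + 1) (n+1) (by omega) (by omega)]
      have hsplit : List.range' k (s.length - k)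
          = List.range' k (r.toNat - k) ++ r.toNat :: List.range' (r.toNat + 1) (s.length - (r.toNat + 1)) := by
        have h1 : List.range' k (r.toNat - k) ++ List.range' (k + 1 * (r.toNat - k)) ((s.length - k) - (r.toNat - k))
            = List.range' k ((r.toNat - k) + ((s.length - k) - (r.toNat - k))) := List.range'_append
        have e1 : k + 1 * (r.toNat - k) = r.toNat := by omega
        have e2 : (r.toNat - k) + ((s.length - k) - (r.toNat - k)) = s.length - k := by omega
        rw [e1, e2] at h1
        rw [← h1]
        congr 1
        have e3 : (s.length - k) - (r.toNat - k) = (s.length - (r.toNat + 1)) + 1 := by omega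
        rw [e3, List.range'_succ]
      rw [hsplit, List.countP_append, List.countP_cons]
      have hz : (List.range' k (r.toNat - k)).countP (fun j => sub.isPrefixOf (s.drop j)) = 0 := by
        rw [List.countP_eq_zero]
        intro j hj
        rw [List.mem_range'_1] at hj
        intro hp
        exact hmin j hj.1 (by omega) ((List.isPrefixOf_iff_prefix).mp hp)
      have hone : (sub.isPrefixOf (s.drop r.toNat)) = true := (List.isPrefixOf_iff_prefix).mpr hpref
      rw [hz, hone]
      simp only [if_true]
      push_cast
      ring

lemma pv_overlap (s sub : List Char) (hsub : sub ≠ []) :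
    overlapCount s sub = (((List.range' 0 s.length).countP (fun j => sub.isPrefixOf (s.drop j))) : Int) := by
  unfold overlapCount
  rw [← PySem.Chars.findFrom_zero]
  have := pv_ov_loop s sub hsub (s.length + 1) 0 0 (Nat.zero_le _) (by omega)
  simpa using this

-- occurrence positions of [x,y] are exactly the adjacent pairs (x,y)
lemma pv_Z (x y : Char) (cs : List Char) :
    (List.range' 0 cs.length).countP (fun j => ([x,y] : List Char).isPrefixOf (cs.drop j))
      = (cs.zip (cs.drop 1)).countP (fun p => p.1 == x && p.2 == y) := by
  induction cs with
  | nil => simp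
  | cons c t ih =>
    have hshift : (List.range' 1 t.length).countP (fun j => ([x,y] : List Char).isPrefixOf ((c :: t).drop j))
        = (List.range' 0 t.length).countP (fun j => ([x,y] : List Char).isPrefixOf (t.drop j)) := by
      rw [List.range'_eq_map_range, List.countP_map]
      rw [List.range_eq_range']
      apply List.countP_congr
      intro j _
      simp [Function.comp, Nat.add_comm 1 j]
    rw [List.length_cons, List.range'_succ, List.countP_cons, hshift, ih]
    cases t with
    | nil => simp [List.isPrefixOf]
    | cons d t' =>
      have hpp : (([x,y] : List Char).isPrefixOf (c :: d :: t')) = (c == x && d == y) := by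
        simp only [List.isPrefixOf, Bool.and_true]
        rw [Bool.beq_comm (a := x), Bool.beq_comm (a := y)]
      simp only [List.drop_succ_cons, List.drop_zero, List.zip_cons_cons, List.countP_cons, hpp]

-- the three components, stated against an abstract initial dict so the literal init dicts
-- of port A can be discharged by decide at the use site
lemma pv_comp1 (cs : List Char) (c0 : Char) (cr : List Char) (hdec : cs = c0 :: cr)
    (hps : ∀ p ∈ cs.zip (cs.drop 1), p.2 ∈ (['A','C','G','U'] : List Char))
    (hc0 : c0 ∈ (['A','C','G','U'] : List Char))
    (N0 : PySem.Dict String Int)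
    (hkeys : N0.keys = ["A","C","G","U"])
    (hz : ∀ a ∈ (["A","C","G","U"] : List String), N0.getD a 0 = 0) :
    ((cs.zip (cs.drop 1)).foldl (fun n p => n.modify (pvChStr p.2) 0 (· + 1)) (N0.insert (pvChStr c0) 1)).items
      = (['A','C','G','U'] : List Char).map (fun x => (pvChStr x, (cs.map (fun c => if c == x then (1 : Int) else 0)).sum)) := by
  have hkins : (N0.insert (pvChStr c0) 1).keys = ["A","C","G","U"] := by
    rw [PySem.Dict.keys_insert_of_contains]
    · exact hkeys
    · rw [PySem.Dict.contains_iff_mem_keys, hkeys]; exact pv_chstr_mem _ hc0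
  have hkf : ((cs.zip (cs.drop 1)).foldl (fun n p => n.modify (pvChStr p.2) 0 (· + 1)) (N0.insert (pvChStr c0) 1)).keys = ["A","C","G","U"] := by
    rw [pv_keys_foldl (fun p : Char × Char => pvChStr p.2) 0 (fun _ => (· + 1)) _ _
      (fun p hp => by rw [hkins]; exact pv_chstr_mem _ (hps p hp))]
    exact hkins
  have hmap : (['A','C','G','U'] : List Char).map pvChStr = (["A","C","G","U"] : List String) := by decide
  rw [PySem.Dict.items_eq_map_keys _ (by rw [hkf]; decide) 0, hkf, ← hmap, List.map_map]
  apply List.map_congr_left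
  intro x hx
  simp only [Function.comp]
  refine Prod.ext rfl ?_
  show _ = (cs.map (fun c => if c == x then (1 : Int) else 0)).sum
  rw [pv_cnt1, PySem.Dict.getD_insert]
  have hsnd : (cs.zip (cs.drop 1)).map (fun p : Char × Char => pvChStr p.2) = cr.map pvChStr := by
    have h1 : (cs.zip (cs.drop 1)).map Prod.snd = cs.drop 1 := List.map_snd_zip (by simp)
    have : (fun p : Char × Char => pvChStr p.2) = pvChStr ∘ Prod.snd := rfl
    rw [this, ← List.map_map, h1, hdec, List.drop_succ_cons, List.drop_zero]
  rw [hsnd, List.count_map_of_injective cr pvChStr pvChStr_inj x,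
    PySem.List.sum_map_ite_one_zero (fun c => c == x) cs, List.count_eq_countP.symm, hdec,
    List.count_cons]
  by_cases hxc : x = c0
  · rw [if_pos (by rw [hxc]), if_pos (by rw [hxc, beq_self_eq_true])]
    push_cast; ring
  · rw [if_neg (fun h => hxc ((pvChStr_eq_iff x c0).mp h)),
      if_neg (by simp [beq_iff_eq]; exact fun h => hxc h.symm), hz (pvChStr x) (pv_chstr_mem _ hx)]
    push_cast; ring

lemma pv_comp2 (cs : List Char)
    (hps : ∀ p ∈ cs.zip (cs.drop 1), p.1 ∈ (['A','C','G','U'] : List Char) ∧ p.2 ∈ (['A','C','G','U'] : List Char))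
    (D0 : PySem.Dict String (PySem.Dict String Int))
    (hk : D0.keys = ["A","C","G","U"])
    (hn : ∀ a ∈ (["A","C","G","U"] : List String), (D0.getD a PySem.Dict.empty).keys = ["A","C","G","U"])
    (h0 : ∀ a ∈ (["A","C","G","U"] : List String), ∀ b ∈ (["A","C","G","U"] : List String),
      (D0.getD a PySem.Dict.empty).getD b 0 = 0) :
    (((cs.zip (cs.drop 1)).foldl (fun d p => d.modify (pvChStr p.1) PySem.Dict.empty
        (fun m => m.modify (pvChStr p.2) 0 (· + 1))) D0).items).map (fun q => (q.1, q.2.items))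
      = (['A','C','G','U'] : List Char).map (fun x => (pvChStr x,
          (['A','C','G','U'] : List Char).map (fun y => (pvChStr y, overlapCount cs [x, y])))) := by
  obtain ⟨hkf, hnf⟩ := pv_keys_inv (cs.zip (cs.drop 1)) hps D0 hk hn
  have hmap : (['A','C','G','U'] : List Char).map pvChStr = (["A","C","G","U"] : List String) := by decide
  rw [PySem.Dict.items_eq_map_keys _ (by rw [hkf]; decide) PySem.Dict.empty, hkf, List.map_map,
    ← hmap, List.map_map]
  apply List.map_congr_left
  intro x hx
  have hxs : pvChStr x ∈ (["A","C","G","U"] : List String) := pv_chstr_mem _ hx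
  simp only [Function.comp]
  refine Prod.ext rfl ?_
  show _ = (['A','C','G','U'] : List Char).map (fun y => (pvChStr y, overlapCount cs [x, y]))
  rw [PySem.Dict.items_eq_map_keys _ (by rw [hnf _ hxs]; decide) 0, hnf _ hxs, ← hmap, List.map_map]
  apply List.map_congr_left
  intro y hy
  simp only [Function.comp]
  refine Prod.ext rfl ?_
  show _ = overlapCount cs [x, y]
  rw [pv_cnt2, h0 (pvChStr x) (pv_chstr_mem _ hx) (pvChStr y) (pv_chstr_mem _ hy),
    pv_overlap cs [x, y] (by simp), pv_Z x y cs]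
  simp only [pvChStr_beq]
  push_cast; ring

lemma pv_comp3 (cs : List Char)
    (hps : ∀ p ∈ cs.zip (cs.drop 1), p.1 ∈ (['A','C','G','U'] : List Char))
    (L0 : PySem.Dict String (List String))
    (hkeys : L0.keys = ["A","C","G","U"])
    (hz : ∀ a ∈ (["A","C","G","U"] : List String), L0.getD a [] = []) :
    ((cs.zip (cs.drop 1)).foldl (fun d p => d.modify (pvChStr p.1) [] (· ++ [pvChStr p.2])) L0).items
      = (['A','C','G','U'] : List Char).map (fun x => (pvChStr x,
          ((cs.zip (cs.drop 1)).filter (fun p => p.1 == x)).map (fun p => pvChStr p.2))) := by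
  have hkf : ((cs.zip (cs.drop 1)).foldl (fun d p => d.modify (pvChStr p.1) [] (· ++ [pvChStr p.2])) L0).keys = ["A","C","G","U"] := by
    rw [pv_keys_foldl (fun p : Char × Char => pvChStr p.1) [] (fun p => (· ++ [pvChStr p.2])) _ _
      (fun p hp => by rw [hkeys]; exact pv_chstr_mem _ (hps p hp))]
    exact hkeys
  have hmap : (['A','C','G','U'] : List Char).map pvChStr = (["A","C","G","U"] : List String) := by decide
  rw [PySem.Dict.items_eq_map_keys _ (by rw [hkf]; decide) [], hkf, ← hmap, List.map_map]
  apply List.map_congr_left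
  intro x hx
  simp only [Function.comp]
  refine Prod.ext rfl ?_
  show _ = ((cs.zip (cs.drop 1)).filter (fun p => p.1 == x)).map (fun p => pvChStr p.2)
  rw [pv_app, hz (pvChStr x) (pv_chstr_mem _ hx)]
  simp only [pvChStr_beq, List.nil_append]

-- lemmas for the tightness theorem: on a one-letter non-ACGTU string the normalized letter is
-- outside ACGU, so A's nuclCnt carries a fifth key and the first components differ in length
lemma pv_toNat_ofNat (n : Nat) (h : n < 55296) : (Char.ofNat n).toNat = n := by
  unfold Char.ofNat
  split
  · rfl
  · next hv => exact absurd (Or.inl h) hv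

lemma pv_char_eq_of_toNat {c : Char} {n : Nat} (h : c.toNat = n) : c = Char.ofNat n := by
  rw [← h, Char.ofNat_toNat]

lemma pv_norm_not_mem (c : Char) (h : c ∉ "ACGTUacgtu".toList) :
    (if PySem.Chars.upperChar c = 'T' then 'U' else PySem.Chars.upperChar c) ∉ (['A','C','G','U'] : List Char) := by
  have hlit : "ACGTUacgtu".toList = (['A','C','G','T','U','a','c','g','t','u'] : List Char) := rfl
  rw [hlit] at h
  intro hmem
  by_cases hl : PySem.Chars.islower c = true
  · have hn : 97 ≤ c.toNat ∧ c.toNat ≤ 122 := by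
      simp [PySem.Chars.islower, Char.le_def] at hl
      exact ⟨hl.1, hl.2⟩
    have hup : (PySem.Chars.upperChar c).toNat = c.toNat - 32 := by
      rw [PySem.Chars.upperChar, if_pos hl]
      exact pv_toNat_ofNat _ (by omega)
    by_cases hT : PySem.Chars.upperChar c = 'T'
    · have h116 : c.toNat = 116 := by
        have hx := congrArg Char.toNat hT
        rw [hup] at hx
        have h84 : ('T' : Char).toNat = 84 := rfl
        rw [h84] at hx
        omega
      have hct : c = 't' := (pv_char_eq_of_toNat h116).trans (by decide)
      subst hct
      exact h (by decide)
    · rw [if_neg hT] at hmem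
      have hmemN : (PySem.Chars.upperChar c).toNat = 65 ∨ (PySem.Chars.upperChar c).toNat = 67
          ∨ (PySem.Chars.upperChar c).toNat = 71 ∨ (PySem.Chars.upperChar c).toNat = 85 := by
        simp only [List.mem_cons, List.not_mem_nil, or_false] at hmem
        rcases hmem with h'|h'|h'|h' <;> rw [h']
        · exact Or.inl rfl
        · exact Or.inr (Or.inl rfl)
        · exact Or.inr (Or.inr (Or.inl rfl))
        · exact Or.inr (Or.inr (Or.inr rfl))
      rw [hup] at hmemN
      rcases hmemN with h'|h'|h'|h'
      · exact h (by rw [pv_char_eq_of_toNat (show c.toNat = 97 by omega)]; decide)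
      · exact h (by rw [pv_char_eq_of_toNat (show c.toNat = 99 by omega)]; decide)
      · exact h (by rw [pv_char_eq_of_toNat (show c.toNat = 103 by omega)]; decide)
      · exact h (by rw [pv_char_eq_of_toNat (show c.toNat = 117 by omega)]; decide)
  · have hup : PySem.Chars.upperChar c = c := by
      rw [PySem.Chars.upperChar, if_neg hl]
    rw [hup] at hmem
    by_cases hT : c = 'T'
    · subst hT
      exact h (by decide)
    · rw [if_neg hT] at hmem
      simp only [List.mem_cons, List.not_mem_nil, or_false] at hmem
      rcases hmem with rfl|rfl|rfl|rfl <;> exact h (by decide)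

lemma pv_len5 (N0 : PySem.Dict String Int) (hkeys : N0.keys = ["A","C","G","U"])
    (hlen : N0.items.length = 4) (k : String) (hk : k ∉ (["A","C","G","U"] : List String)) :
    ((N0.insert k 1).items).length = 5 := by
  rw [PySem.Dict.items_insert_of_not_contains _ _ (by
    rw [PySem.Dict.contains_eq_decide_mem_keys, hkeys]
    simpa using hk)]
  simp [hlen]

-- ===== VERDICT (by name: the statement is the Claim_ definition above) =====
theorem computeCountAndLists_spec : Claim_unchanged_computeCountAndLists := by
  intro s _ hpre hnD
  obtain ⟨hne, hcase⟩ := hpre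
  have hvalid : ∀ c ∈ s.toList, c ∈ (['A','C','G','T','U','a','c','g','t','u'] : List Char) := by
    rcases hcase with h1 | hv
    · obtain ⟨a, ha⟩ := List.length_eq_one_iff.mp h1
      unfold D_computeCountAndLists at hnD
      push Not at hnD
      have hlen : s.length = 1 := by rw [← String.length_toList]; exact h1
      obtain ⟨c, hc, hcv⟩ := hnD hlen
      have hlit : "ACGTUacgtu".toList = (['A','C','G','T','U','a','c','g','t','u'] : List Char) := rfl
      rw [hlit] at hcv
      intro c' hc'
      rw [ha] at hc hc'
      simp only [List.mem_singleton] at hc hc'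
      subst hc; subst hc'
      simpa using hcv
    · exact hv
  show computeCountAndLists s = computeCountAndLists_alt s
  unfold computeCountAndLists computeCountAndLists_alt
  simp only []
  rw [PySem.List.slice_from_one, ← List.drop_one]
  rw [pv_A_fold]
  set cs := PySem.Chars.replace (PySem.Chars.upper s.toList) ['T'] ['U'] with hcs
  have hcsne : cs ≠ [] := by
    intro h
    have := pv_norm_length s.toList
    rw [← hcs, h] at this
    simp at this
    exact hne (List.eq_nil_of_length_eq_zero this.symm)
  have hv : ∀ c ∈ cs, c ∈ (['A','C','G','U'] : List Char) := by
    rw [hcs]; exact pv_norm_valid s.toList hvalid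
  obtain ⟨c0, cr, hdec⟩ := List.exists_cons_of_ne_nil hcsne
  have hc0 : c0 ∈ (['A','C','G','U'] : List Char) := hv c0 (by rw [hdec]; exact List.mem_cons_self ..)
  have hget0 : PySem.List.pyGetD cs 0 'A' = c0 := by
    rw [hdec, PySem.List.pyGetD_eq_getElem _ 'A' (by omega) (by simp)]
    simp
  have hpsv : ∀ p ∈ cs.zip (cs.drop 1), p.1 ∈ (['A','C','G','U'] : List Char) ∧ p.2 ∈ (['A','C','G','U'] : List Char) := by
    intro p hp
    rcases p with ⟨px, py⟩
    obtain ⟨h1, h2⟩ := List.of_mem_zip hp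
    exact ⟨hv _ h1, hv _ (List.mem_of_mem_drop h2)⟩
  rw [hget0]
  refine Prod.ext ?_ (Prod.ext ?_ ?_)
  · refine pv_comp1 cs c0 cr hdec (fun p hp => (hpsv p hp).2) hc0 _ ?_ ?_
    · decide
    · decide
  · refine pv_comp2 cs hpsv _ ?_ ?_ ?_
    · decide
    · decide
    · decide
  · refine pv_comp3 cs (fun p hp => (hpsv p hp).1) _ ?_ ?_
    · decide
    · decide

theorem computeCountAndLists_changed : Claim_changed_computeCountAndLists := by
  unfold Claim_changed_computeCountAndLists
  refine ⟨by decide, by decide, ⟨rfl, ?_⟩, by rfl, by rfl, by decide⟩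
  intro c hc
  have h : pvDiffWitness_computeCountAndLists.toList = ['X'] := rfl
  rw [h] at hc
  have hcx : c = 'X' := by simpa using hc
  subst hcx
  have hlit : "ACGTUacgtu".toList = (['A','C','G','T','U','a','c','g','t','u'] : List Char) := rfl
  rw [hlit]
  decide

theorem computeCountAndLists_tight : Claim_exact_computeCountAndLists := by
  intro s _ _ hD heq
  obtain ⟨hlen, hinv⟩ := hD
  have h1 : s.toList.length = 1 := by rw [String.length_toList]; exact hlen
  obtain ⟨c, hc⟩ := List.length_eq_one_iff.mp h1
  have hcv : c ∉ "ACGTUacgtu".toList := hinv c (by rw [hc]; exact List.mem_cons_self ..)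
  have hnot := pv_norm_not_mem c hcv
  set u : Char := if PySem.Chars.upperChar c = 'T' then 'U' else PySem.Chars.upperChar c with hu
  have hnotS : pvChStr u ∉ (["A","C","G","U"] : List String) := by
    intro hmem
    simp only [List.mem_cons, List.not_mem_nil, or_false] at hmem
    rcases hmem with h'|h'|h'|h'
    · exact hnot (by rw [(pvChStr_eq_iff u 'A').mp h']; decide)
    · exact hnot (by rw [(pvChStr_eq_iff u 'C').mp h']; decide)
    · exact hnot (by rw [(pvChStr_eq_iff u 'G').mp h']; decide)
    · exact hnot (by rw [(pvChStr_eq_iff u 'U').mp h']; decide)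
  have hcs : PySem.Chars.replace (PySem.Chars.upper s.toList) ['T'] ['U'] = [u] := by
    rw [pv_replace_single, hc]
    simp [PySem.Chars.upper, hu]
  have hB : (computeCountAndLists_alt s).1.length = 4 := by
    unfold computeCountAndLists_alt
    simp
  have hA : (computeCountAndLists s).1.length = 5 := by
    unfold computeCountAndLists
    simp only []
    rw [hcs, pv_A_fold]
    simp only [show (([u] : List Char).zip (([u] : List Char).drop 1)) = [] from rfl, List.foldl_nil]
    show ((_ : PySem.Dict String Int).insert (pvChStr (PySem.List.pyGetD [u] 0 'A')) 1).items.length = 5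
    rw [show PySem.List.pyGetD [u] 0 'A' = u from rfl]
    exact pv_len5 _ (by decide) (by decide) _ hnotS
  rw [heq, hB] at hA
  exact absurd hA (by omega)
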